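-- pv_equiv track=rewrite | github.com/mirskow/ml_algorithms | classification/KNN.py | _check_similar_votes
-- ===== SOURCE A (Python) =====
-- def _check_similar_votes(votes):
--     identical_keys = []
--     unique_values = set(votes.values())
--
--     for value in unique_values:
--         keys_with_value = [key for key, val in votes.items() if val == value]
--         if len(keys_with_value) > 1:
--             identical_keys.extend(keys_with_value)
--
--     return identical_keys
-- ===== SOURCE B (Python) =====
-- def _check_similar_votes(votes):
--     counts = {}
--     for v in votes.values():
--         counts[v] = counts.get(v, 0) + 1
--     return [key for key, val in votes.items() if counts[val] > 1]
-- ===== Notes on version B (the rewrite author's own statement) =====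
-- stated objective: alternative
-- what changed: Replaced the per-unique-value rescans of the dict with a single counting pass over the values followed by one filtering pass over the items; Pre_ excludes dicts with two or more distinct shared values, where A's output order follows Python's set iteration (hash) order, which is accidental, and association lists with duplicate keys, which do not represent a Python dict.
-- outside the precondition, e.g. on _check_similar_votes({1: 10, 2: 10, 3: 20, 4: 20}): A returns [1, 2, 3, 4], B returns [1, 2, 3, 4]
import Mathlib
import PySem

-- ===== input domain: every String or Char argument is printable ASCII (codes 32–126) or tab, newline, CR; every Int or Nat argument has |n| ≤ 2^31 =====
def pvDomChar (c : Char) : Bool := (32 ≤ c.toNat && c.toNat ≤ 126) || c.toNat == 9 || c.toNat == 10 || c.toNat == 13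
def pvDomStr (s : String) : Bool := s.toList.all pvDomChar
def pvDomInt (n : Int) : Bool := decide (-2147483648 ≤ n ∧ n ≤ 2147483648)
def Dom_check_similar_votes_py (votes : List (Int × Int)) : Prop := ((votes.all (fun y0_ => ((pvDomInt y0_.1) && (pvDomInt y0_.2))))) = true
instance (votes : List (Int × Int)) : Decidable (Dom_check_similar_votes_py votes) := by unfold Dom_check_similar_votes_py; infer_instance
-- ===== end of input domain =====

-- B replaces A's per-unique-value rescans of the dict with one counting pass plus one
-- filtering pass (alternative algorithm). Pre_ excludes dicts where two or more distinct
-- values are shared (A's output order then follows Python's set hash order) and duplicate keys.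


-- ===== PORT A =====
-- for value in unique_values: … identical_keys.extend(keys_with_value) …
def check_similar_votes_py (votes : List (Int × Int)) : List Int :=
  -- votes.values() / votes.items(): under Pre_ keys are unique, so the association list
  -- votes IS the dict's items and votes.map Prod.snd its values (exact there)
  let unique_values : PySem.Set Int := PySem.Set.ofList (votes.map Prod.snd)
  unique_values.foldl
    (fun identical_keys value =>
      let keys_with_value := (votes.filter (fun kv => kv.2 == value)).map Prod.fst
      if keys_with_value.length > 1 then identical_keys ++ keys_with_value else identical_keys)
    []

-- ===== PORT B =====
-- counts[v] = counts.get(v, 0) + 1 over values, then one filtering pass over items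
def check_similar_votes_py_alt (votes : List (Int × Int)) : List Int :=
  let counts : PySem.Dict Int Int :=
    (votes.map Prod.snd).foldl (fun d v => d.modify v 0 (· + 1)) PySem.Dict.empty
  (votes.filter (fun kv => counts.getD kv.2 0 > 1)).map Prod.fst

-- ===== PRECONDITION & SPEC =====
-- Pre_ excludes (a) dicts in which two or more distinct values are each shared by ≥ 2 keys:
-- there A's output order follows Python's set iteration (hash) order, which is accidental and
-- not modelled; and (b) association lists with duplicate keys, which do not represent a dict.
def Pre_check_similar_votes_py (votes : List (Int × Int)) : Prop :=
  (votes.map Prod.fst).Nodup ∧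
  (((PySem.Set.ofList (votes.map Prod.snd)).filter
      (fun v => (votes.map Prod.snd).count v > 1)).length ≤ 1)
instance (votes : List (Int × Int)) : Decidable (Pre_check_similar_votes_py votes) := by unfold Pre_check_similar_votes_py; infer_instance

def pvWitness_check_similar_votes_py : (List (Int × Int)) := [(1, 5), (2, 5), (3, 7)]

def Spec_check_similar_votes_py (votes : List (Int × Int)) (out : List Int) : Prop := out = check_similar_votes_py_alt votes
instance (votes : List (Int × Int)) (out : List Int) : Decidable (Spec_check_similar_votes_py votes out) := by unfold Spec_check_similar_votes_py; infer_instance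

-- ===== CLAIM (what is proved, stated in full; the proofs are below) =====
def Claim_equal_check_similar_votes_py : Prop := ∀ (votes : List (Int × Int)), Dom_check_similar_votes_py votes → Pre_check_similar_votes_py votes → Spec_check_similar_votes_py votes (check_similar_votes_py votes)

-- ===== LEMMAS AND PROOFS =====

-- A as filter/flatMap over the distinct values
theorem portA_eq_flatMap (votes : List (Int × Int)) :
    check_similar_votes_py votes =
      ((PySem.Set.ofList (votes.map Prod.snd)).filter
          (fun v => (votes.map Prod.snd).count v > 1)).flatMap
        (fun v => (votes.filter (fun kv => kv.2 == v)).map Prod.fst) := by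
  simp only [check_similar_votes_py]
  rw [PySem.List.foldl_ite_eq_foldl_filter
        (p := fun value => ((votes.filter (fun kv => kv.2 == value)).map Prod.fst).length > 1)
        (f := fun acc value => acc ++ (votes.filter (fun kv => kv.2 == value)).map Prod.fst),
      PySem.List.foldl_append_eq_flatMap]
  simp only [List.nil_append]
  congr 1
  apply List.filter_congr
  intro v _
  simp [List.count_eq_countP, List.countP_map, Function.comp_def, ← List.countP_eq_length_filter]

-- B with the counter resolved
theorem portB_eq_filter (votes : List (Int × Int)) :
    check_similar_votes_py_alt votes =
      (votes.filter (fun kv => (votes.map Prod.snd).count kv.2 > 1)).map Prod.fst := by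
  simp only [check_similar_votes_py_alt]
  congr 1
  apply List.filter_congr
  intro kv _
  simp [PySem.Dict.getD_foldl_modify_add_one, PySem.Dict.getD_empty]

-- ===== VERDICT (by name: the statement is the Claim_ definition above) =====
theorem check_similar_votes_py_spec : Claim_equal_check_similar_votes_py := by
  intro votes _ hpre
  obtain ⟨-, hlen⟩ := hpre
  unfold Spec_check_similar_votes_py
  rw [portA_eq_flatMap, portB_eq_filter]
  have hmem : ∀ kv : Int × Int, kv ∈ votes → (votes.map Prod.snd).count kv.2 > 1 →
      kv.2 ∈ (PySem.Set.ofList (votes.map Prod.snd)).filter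
        (fun v => decide ((votes.map Prod.snd).count v > 1)) := by
    intro kv hkv hc
    rw [List.mem_filter]
    exact ⟨(PySem.Set.mem_ofList _ _).mpr (List.mem_map_of_mem hkv), by simpa using hc⟩
  rcases hcase : (PySem.Set.ofList (votes.map Prod.snd)).filter
      (fun v => decide ((votes.map Prod.snd).count v > 1)) with _ | ⟨v, rest⟩
  · simp only [List.flatMap_nil]
    symm
    rw [List.map_eq_nil_iff, List.filter_eq_nil_iff]
    intro kv hkv
    simp only [decide_eq_true_eq]
    intro hc
    have := hmem kv hkv hc
    rw [hcase] at this
    simp at this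
  · have hrest : rest = [] := by
      rw [hcase] at hlen
      simp only [List.length_cons] at hlen
      exact List.length_eq_zero_iff.mp (by omega)
    subst hrest
    have hvc : (votes.map Prod.snd).count v > 1 := by
      have hv : v ∈ (PySem.Set.ofList (votes.map Prod.snd)).filter
          (fun v => decide ((votes.map Prod.snd).count v > 1)) := by
        rw [hcase]; exact List.mem_singleton.mpr rfl
      simpa using (List.mem_filter.mp hv).2
    simp only [List.flatMap_cons, List.flatMap_nil, List.append_nil]
    congr 1
    apply List.filter_congr
    intro kv hkv
    by_cases h : (votes.map Prod.snd).count kv.2 > 1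
    · have hmv := hmem kv hkv h
      rw [hcase] at hmv
      have hkveq : kv.2 = v := List.mem_singleton.mp hmv
      simp [hkveq, hvc]
    · have hne : kv.2 ≠ v := fun he => h (he ▸ hvc)
      simp [h, hne]
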